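-- pv_equiv track=rewrite | github.com/Dekchairukna/petanque_tournament | app.py | calculate_group_sizes
-- ===== SOURCE A (Python) =====
-- import math
--
-- def valid_group_count(team_count, group_count):
--     return group_count > 0 and (3 * group_count) <= team_count <= (4 * group_count)
--
-- def calculate_group_count(team_count):
--     for groups in range(math.ceil(team_count / 4), math.floor(team_count / 3) + 1):
--         if valid_group_count(team_count, groups):
--             return groups
--     return None
--
-- def calculate_group_sizes(team_count, manual_group_count=None):
--     if manual_group_count:
--         if not valid_group_count(team_count, manual_group_count):
--             raise ValueError("จำนวนสายที่กำหนดทำให้บางสายมีทีมน้อยกว่า 3 หรือมากกว่า 4")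
--         group_count = manual_group_count
--     else:
--         group_count = calculate_group_count(team_count)
--         if group_count is None:
--             raise ValueError("จำนวนทีมนี้ไม่สามารถจัดสายแบบ 3–4 ทีมได้")
--     sizes = [3] * group_count
--     remaining = team_count - (3 * group_count)
--     idx = 0
--     while remaining > 0:
--         if sizes[idx] < 4:
--             sizes[idx] += 1
--             remaining -= 1
--         idx += 1
--     return sizes
-- ===== SOURCE B (Python) =====
-- def calculate_group_sizes(team_count, manual_group_count=None):
--     if manual_group_count:
--         group_count = manual_group_count
--         if not (group_count > 0 and 3 * group_count <= team_count <= 4 * group_count):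
--             raise ValueError("จำนวนสายที่กำหนดทำให้บางสายมีทีมน้อยกว่า 3 หรือมากกว่า 4")
--     else:
--         group_count = -(-team_count // 4)  # ceil(team_count / 4)
--         if not (group_count > 0 and 3 * group_count <= team_count):
--             raise ValueError("จำนวนทีมนี้ไม่สามารถจัดสายแบบ 3–4 ทีมได้")
--     remaining = team_count - 3 * group_count
--     return [4] * remaining + [3] * (group_count - remaining)
-- ===== Notes on version B (the rewrite author's own statement) =====
-- stated objective: simpler
-- what changed: Replaces the range-scan helper (the first valid count is always ceil(team_count/4)) and the index-walking while loop with a closed-form count and a direct [4]*remaining + [3]*(group_count-remaining) construction.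
import Mathlib
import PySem

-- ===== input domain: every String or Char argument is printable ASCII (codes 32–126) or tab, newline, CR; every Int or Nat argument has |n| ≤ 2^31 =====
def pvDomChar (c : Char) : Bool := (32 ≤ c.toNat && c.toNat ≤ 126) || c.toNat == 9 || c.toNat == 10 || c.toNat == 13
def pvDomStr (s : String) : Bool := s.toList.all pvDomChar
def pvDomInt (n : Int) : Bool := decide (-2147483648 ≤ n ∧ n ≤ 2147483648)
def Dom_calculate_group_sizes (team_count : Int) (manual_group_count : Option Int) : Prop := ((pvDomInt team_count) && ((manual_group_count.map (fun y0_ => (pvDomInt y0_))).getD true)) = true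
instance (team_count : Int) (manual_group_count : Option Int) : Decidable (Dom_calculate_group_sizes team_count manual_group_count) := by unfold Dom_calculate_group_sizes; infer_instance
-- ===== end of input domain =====

-- B replaces A's range scan for the group count and its index-walking fill loop
-- by a closed-form count and a direct [4]*r ++ [3]*(g-r) list construction (objective: simpler).

-- ===== PORT A =====
-- valid_group_count
def pvValidGroupCount (team_count group_count : Int) : Bool :=
  decide (0 < group_count) && decide (3 * group_count ≤ team_count) && decide (team_count ≤ 4 * group_count)

-- calculate_group_count; math.ceil(n/4) and math.floor(n/3) are ported as exact integer
-- ceiling/floor division (exact: |n| ≤ 2^31 < 2^53, float division is exact enough there)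
def pvCalcGroupCount (team_count : Int) : Option Int :=
  (PySem.List.pyRange (-(PySem.Int.floordiv (-team_count) 4)) (PySem.Int.floordiv team_count 3 + 1) 1).find?
    (fun groups => pvValidGroupCount team_count groups)

-- the while loop; fuel bounds the iterations (inside Pre_ the loop stops, remaining = 0,
-- before fuel runs out, and the pyGet? none (IndexError) branch is unreachable)
def pvFill : Nat → List Int → Int → Nat → List Int
  | 0, sizes, _, _ => sizes
  | fuel + 1, sizes, remaining, idx =>
    if remaining > 0 then
      match PySem.List.pyGet? sizes (idx : Int) with
      | none => sizes
      | some v =>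
        if v < 4 then pvFill fuel (sizes.set idx (v + 1)) (remaining - 1) (idx + 1)
        else pvFill fuel sizes remaining (idx + 1)
    else sizes

def calculate_group_sizes (team_count : Int) (manual_group_count : Option Int) : List Int :=
  let gc? : Option Int :=
    match manual_group_count with
    | some v =>
        if v ≠ 0 then (if pvValidGroupCount team_count v then some v else none)
        else pvCalcGroupCount team_count
    | none => pvCalcGroupCount team_count
  match gc? with
  | none => []   -- A raises ValueError here; outside Pre_
  | some group_count =>
    let sizes := List.replicate group_count.toNat 3
    pvFill sizes.length sizes (team_count - 3 * group_count) 0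

-- ===== PORT B =====
def pvAltAuto (team_count : Int) : Option Int :=
  let g := -(PySem.Int.floordiv (-team_count) 4)   -- -(-team_count // 4)
  if decide (0 < g) && decide (3 * g ≤ team_count) then some g else none

def calculate_group_sizes_alt (team_count : Int) (manual_group_count : Option Int) : List Int :=
  let g? : Option Int :=
    match manual_group_count with
    | some v =>
        if v ≠ 0 then
          (if decide (0 < v) && decide (3 * v ≤ team_count) && decide (team_count ≤ 4 * v)
           then some v else none)
        else pvAltAuto team_count
    | none => pvAltAuto team_count
  match g? with
  | none => []   -- B raises ValueError here; outside Pre_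
  | some g =>
    let remaining := team_count - 3 * g
    List.replicate remaining.toNat 4 ++ List.replicate (g - remaining).toNat 3

-- ===== PRECONDITION & SPEC =====
-- Pre_ = exactly the inputs where A returns (both A and B raise ValueError outside it):
-- a truthy manual count must satisfy 3g ≤ n ≤ 4g with g > 0, and the automatic path
-- succeeds exactly for team counts ≥ 3 other than 5.
def Pre_calculate_group_sizes (team_count : Int) (manual_group_count : Option Int) : Prop :=
  match manual_group_count with
  | some v =>
      if v = 0 then 3 ≤ team_count ∧ team_count ≠ 5
      else 0 < v ∧ 3 * v ≤ team_count ∧ team_count ≤ 4 * v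
  | none => 3 ≤ team_count ∧ team_count ≠ 5

instance (team_count : Int) (manual_group_count : Option Int) : Decidable (Pre_calculate_group_sizes team_count manual_group_count) := by
  unfold Pre_calculate_group_sizes; rcases manual_group_count with _ | v <;> infer_instance

def pvWitness_calculate_group_sizes : Int × Option Int := (10, none)

def Spec_calculate_group_sizes (team_count : Int) (manual_group_count : Option Int) (out : List Int) : Prop := out = calculate_group_sizes_alt team_count manual_group_count
instance (team_count : Int) (manual_group_count : Option Int) (out : List Int) : Decidable (Spec_calculate_group_sizes team_count manual_group_count out) := by unfold Spec_calculate_group_sizes; infer_instance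

-- ===== CLAIM (what is proved, stated in full; the proofs are below) =====
def Claim_equal_calculate_group_sizes : Prop := ∀ (team_count : Int) (manual_group_count : Option Int), Dom_calculate_group_sizes team_count manual_group_count → Pre_calculate_group_sizes team_count manual_group_count → Spec_calculate_group_sizes team_count manual_group_count (calculate_group_sizes team_count manual_group_count)

-- ===== LEMMAS AND PROOFS =====

-- the while loop returns immediately when remaining ≤ 0
theorem pvFill_of_nonpos (fuel : Nat) (sizes : List Int) (remaining : Int) (idx : Nat)
    (h : ¬ remaining > 0) : pvFill fuel sizes remaining idx = sizes := by
  cases fuel <;> simp [pvFill, h]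

-- loop invariant: after k increments the list is [4]*k ++ [3]*(g-k)
theorem pvFill_invariant (g r : Nat) (hr : r ≤ g) :
    ∀ d k, k + d = r →
    pvFill (g - k) (List.replicate k 4 ++ List.replicate (g - k) 3) ((r : Int) - k) k
      = List.replicate r 4 ++ List.replicate (g - r) 3 := by
  intro d
  induction d with
  | zero =>
    intro k hk
    have hk' : k = r := by omega
    subst hk'
    rw [pvFill_of_nonpos _ _ _ _ (by simp)]
  | succ d ih =>
    intro k hk
    have hkr : k < r := by omega
    have hkg : k < g := by omega
    have hgk : g - k = (g - (k + 1)) + 1 := by omega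
    rw [hgk]
    have hget : PySem.List.pyGet?
        (List.replicate k 4 ++ List.replicate ((g - (k + 1)) + 1) (3 : Int)) (k : Int)
        = some 3 := by
      rw [PySem.List.pyGet?_natCast]
      rw [List.getElem?_append_right (by simp)]
      simp
    have hset : (List.replicate k 4 ++ List.replicate ((g - (k + 1)) + 1) (3 : Int)).set k 4
        = List.replicate (k + 1) 4 ++ List.replicate (g - (k + 1)) 3 := by
      rw [List.replicate_succ, List.set_append_right _ _ (by simp)]
      simp [List.replicate_succ' (n := k)]
    simp only [pvFill]
    rw [if_pos (by omega)]
    split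
    · next heq => exact absurd (hget.symm.trans heq) (by simp)
    · next v heq =>
      have hv : (3 : Int) = v := Option.some.inj (hget.symm.trans heq)
      subst hv
      rw [if_pos (by norm_num)]
      have hset4 : (3 : Int) + 1 = 4 := by norm_num
      rw [hset4, hset]
      have harith : (r : Int) - k - 1 = (r : Int) - ((k + 1 : Nat) : Int) := by push_cast; ring
      rw [harith]
      exact ih (k + 1) (by omega)

-- common closing lemma: for a valid group count the fill loop equals the closed form
theorem pvFill_closed (n g : Int) (h1 : 0 < g) (h2 : 3 * g ≤ n) (h3 : n ≤ 4 * g) :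
    pvFill (List.replicate g.toNat (3 : Int)).length (List.replicate g.toNat 3) (n - 3 * g) 0
      = List.replicate (n - 3 * g).toNat 4 ++ List.replicate (g - (n - 3 * g)).toNat 3 := by
  have hrg : (n - 3 * g).toNat ≤ g.toNat := by omega
  have key := pvFill_invariant g.toNat (n - 3 * g).toNat hrg (n - 3 * g).toNat 0 (by omega)
  simp only [Nat.sub_zero, List.replicate_zero, List.nil_append, Nat.cast_zero, sub_zero] at key
  rw [Int.toNat_of_nonneg (show (0 : Int) ≤ n - 3 * g by omega)] at key
  rw [List.length_replicate, key]
  congr 1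
  congr 1
  omega

-- the automatic path: for 3 ≤ n, n ≠ 5 the ceiling count is valid and both searches return it
theorem pvCeil_facts (n : Int) (hn : 3 ≤ n) (hn5 : n ≠ 5) :
    0 < -(PySem.Int.floordiv (-n) 4) ∧ 3 * -(PySem.Int.floordiv (-n) 4) ≤ n
      ∧ n ≤ 4 * -(PySem.Int.floordiv (-n) 4) := by
  have h := (PySem.Int.neg_floordiv_neg_eq_iff_of_pos
      (a := n) (b := 4) (q := -(PySem.Int.floordiv (-n) 4)) (by norm_num)).mp rfl
  omega

theorem pvCalc_eq_ceil (n : Int) (hn : 3 ≤ n) (hn5 : n ≠ 5) :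
    pvCalcGroupCount n = some (-(PySem.Int.floordiv (-n) 4)) := by
  obtain ⟨h1, h2, h3⟩ := pvCeil_facts n hn hn5
  have hfl : -(PySem.Int.floordiv (-n) 4) ≤ PySem.Int.floordiv n 3 :=
    (PySem.Int.le_floordiv_iff_mul_le (b := 3) (by norm_num)).mpr (by omega)
  unfold pvCalcGroupCount
  rw [PySem.List.pyRange_one_cons (by omega)]
  refine List.find?_cons_of_pos ?_
  simp only [pvValidGroupCount, Bool.and_eq_true, decide_eq_true_eq]
  exact ⟨⟨h1, h2⟩, h3⟩

theorem pvAuto_eq (n : Int) (hn : 3 ≤ n) (hn5 : n ≠ 5) :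
    (match pvCalcGroupCount n with
      | none => ([] : List Int)
      | some group_count =>
        let sizes := List.replicate group_count.toNat (3 : Int)
        pvFill sizes.length sizes (n - 3 * group_count) 0)
      = (match pvAltAuto n with
        | none => ([] : List Int)
        | some g =>
          let remaining := n - 3 * g
          List.replicate remaining.toNat 4 ++ List.replicate (g - remaining).toNat 3) := by
  obtain ⟨h1, h2, h3⟩ := pvCeil_facts n hn hn5
  rw [pvCalc_eq_ceil n hn hn5]
  unfold pvAltAuto
  simp only [h1, h2, decide_true, Bool.and_self, if_true]
  exact pvFill_closed n _ h1 h2 h3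

-- ===== VERDICT (by name: the statement is the Claim_ definition above) =====
theorem calculate_group_sizes_spec : Claim_equal_calculate_group_sizes := by
  intro n m _ hpre
  unfold Spec_calculate_group_sizes
  unfold calculate_group_sizes calculate_group_sizes_alt
  rcases m with _ | v
  · unfold Pre_calculate_group_sizes at hpre
    simpa using pvAuto_eq n hpre.1 hpre.2
  · unfold Pre_calculate_group_sizes at hpre
    by_cases hv : v = 0
    · subst hv
      simp only at hpre
      simpa using pvAuto_eq n hpre.1 hpre.2
    · simp only [if_neg hv] at hpre
      obtain ⟨h1, h2, h3⟩ := hpre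
      simp only [hv, ne_eq, not_false_eq_true,
        pvValidGroupCount, h1, h2, h3, decide_true, Bool.and_self, if_pos]
      exact pvFill_closed n v h1 h2 h3
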